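-- pv_equiv track=rewrite | github.com/greysome/generate-small-rings | additive.py | divseq
-- ===== SOURCE A (Python) =====
-- def divseq(fp):
--     seq = []
--     L = list(fp.keys())
--     while True:
--         if not fp.keys():
--             # all keys deleted, meaning all numbers generated
--             break
--         cur = 1
--         for p in L:
--             # the key was deleted halfway
--             if p not in fp.keys():
--                 continue
--             P = fp[p]
--             max_idx = P.index(max(P))
--             cur *= p**P[max_idx]
--             if len(P) > 1:
--                 del fp[p][max_idx]
--             else:
--                 del fp[p]
--         seq.append(cur)
--     return seq
-- ===== SOURCE B (Python) =====
-- def divseq(fp):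
--     # Pre-sort each exponent list descending once, then emit the products
--     # column by column.  Does not mutate fp (A empties it); return value only.
--     primes = list(fp.keys())
--     cols = [sorted(P, reverse=True) for P in fp.values()]
--     n = 0
--     for c in cols:
--         if len(c) > n:
--             n = len(c)
--     seq = []
--     for i in range(n):
--         cur = 1
--         for p, c in zip(primes, cols):
--             if i < len(c):
--                 cur *= p ** c[i]
--         seq.append(cur)
--     return seq
-- ===== Notes on version B (the rewrite author's own statement) =====
-- stated objective: alternative
-- what changed: Instead of repeatedly scanning each list for its max (index(max) + delete) while mutating the dict, B sorts each exponent list descending once and emits the products column by column; B also does not mutate fp.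
-- outside the precondition, e.g. on divseq({2: [-1]}): A returns [0.5], B returns [0.5]
import Mathlib
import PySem

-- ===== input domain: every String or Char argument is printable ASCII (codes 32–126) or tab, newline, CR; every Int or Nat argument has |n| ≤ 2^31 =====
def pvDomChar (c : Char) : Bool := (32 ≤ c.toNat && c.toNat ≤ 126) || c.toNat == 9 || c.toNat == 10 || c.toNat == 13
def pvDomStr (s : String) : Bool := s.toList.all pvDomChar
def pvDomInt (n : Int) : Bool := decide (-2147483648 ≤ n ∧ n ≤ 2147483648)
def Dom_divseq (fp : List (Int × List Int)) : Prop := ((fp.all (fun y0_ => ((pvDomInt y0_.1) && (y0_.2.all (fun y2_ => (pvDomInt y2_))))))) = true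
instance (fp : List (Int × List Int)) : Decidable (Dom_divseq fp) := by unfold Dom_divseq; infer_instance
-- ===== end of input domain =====

-- B sorts each exponent list descending once and emits the products column by column
-- (A repeatedly rescans each list for its max while deleting from the dict); return-value
-- equivalence only: the Python A empties fp in place, B does not mutate it.

-- ===== PORT A =====
-- body of A's inner `for p in L:` loop; state = (cur, fp)
def divseqKey (st : Int × PySem.Dict Int (List Int)) (p : Int) : Int × PySem.Dict Int (List Int) :=
  match st.2.get? p with
  | none => st            -- `if p not in fp.keys(): continue`
  | some P =>
      match PySem.List.max? P (fun x => x) with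
      | none => st        -- max(P) raises ValueError on empty P: outside Pre_
      | some m =>
          let maxIdx := (PySem.List.index? P m).getD 0     -- P.index(max(P)); max(P) ∈ P so never the default
          let cur := st.1 * p ^ (P.getD maxIdx 0).toNat    -- cur *= p ** P[max_idx]  (a negative exponent, a float in Python, is outside Pre_)
          if 1 < P.length then (cur, st.2.insert p (P.eraseIdx maxIdx))   -- del fp[p][max_idx]
          else (cur, st.2.erase p)                                        -- del fp[p]

-- A's `while True:` loop; the fuel (total number of exponents + 1) strictly exceeds the
-- number of iterations on every input Pre_ admits, so the loop always hits its `break`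
def divseqLoop (L : List Int) : Nat → PySem.Dict Int (List Int) → List Int → List Int
  | 0, _, seq => seq
  | fuel+1, d, seq =>
      if d.size = 0 then seq                    -- `if not fp.keys(): break`
      else
        let st := L.foldl divseqKey (1, d)
        divseqLoop L fuel st.2 (seq ++ [st.1])  -- seq.append(cur)

-- NOTE: the Python A mutates fp in place (it ends up emptying it); the equivalence proved
-- in this file is about the RETURN value only (B does not mutate fp).
def divseq (fp : List (Int × List Int)) : List Int :=
  let d := PySem.Dict.ofList fp
  divseqLoop d.keys (d.values.foldl (fun a P => a + P.length) 0 + 1) d []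

-- ===== PORT B =====
def pvSortDesc (P : List Int) : List Int := PySem.List.sorted P (fun x => x) true   -- sorted(P, reverse=True)

def divseq_alt (fp : List (Int × List Int)) : List Int :=
  let cols := (PySem.Dict.ofList fp).items.map (fun pr => (pr.1, pvSortDesc pr.2))  -- zip(primes, cols)
  let n := cols.foldl (fun a pc => if pc.2.length > a then pc.2.length else a) 0
  (List.range n).map (fun i =>
    cols.foldl (fun cur pc => if i < pc.2.length then cur * pc.1 ^ (pc.2.getD i 0).toNat else cur) 1)

-- ===== PRECONDITION & SPEC =====
-- Pre_ excludes inputs where some value list of the dict is empty (A then raises ValueError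
-- when taking its max) and inputs with a negative exponent (Python's p**e is then a float, not an int).
def Pre_divseq (fp : List (Int × List Int)) : Prop :=
  ∀ pr ∈ (PySem.Dict.ofList fp).items, pr.2 ≠ [] ∧ ∀ e ∈ pr.2, 0 ≤ e
instance (fp : List (Int × List Int)) : Decidable (Pre_divseq fp) := by unfold Pre_divseq; infer_instance
def pvWitness_divseq : (List (Int × List Int)) := [(2, [1, 2]), (3, [1])]

def Spec_divseq (fp : List (Int × List Int)) (out : List Int) : Prop := out = divseq_alt fp
instance (fp : List (Int × List Int)) (out : List Int) : Decidable (Spec_divseq fp out) := by unfold Spec_divseq; infer_instance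

-- ===== CLAIM (what is proved, stated in full; the proofs are below) =====
def Claim_equal_divseq : Prop := ∀ (fp : List (Int × List Int)), Dom_divseq fp → Pre_divseq fp → Spec_divseq fp (divseq fp)

-- ===== LEMMAS AND PROOFS =====

-- ghost state: cs pairs each prime of the dict with its REMAINING sorted-descending column
-- (an empty column = the key was already deleted by A); all invariants are stated on cs.
def pvRelPair (pV pc : Int × List Int) : Prop := pV.1 = pc.1 ∧ pvSortDesc pV.2 = pc.2
def pvFilt (cs : List (Int × List Int)) : List (Int × List Int) := cs.filter (fun pc => !pc.2.isEmpty)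
def pvRoundProd : List (Int × List Int) → Int
  | [] => 1
  | pc :: t => (match pc.2 with | [] => 1 | e :: _ => pc.1 ^ e.toNat) * pvRoundProd t
def pvDropC (i : Nat) (cs : List (Int × List Int)) : List (Int × List Int) := cs.map (fun pc => (pc.1, pc.2.drop i))
def pvTailC (cs : List (Int × List Int)) : List (Int × List Int) := cs.map (fun pc => (pc.1, pc.2.tail))
def pvM (cs : List (Int × List Int)) : Nat := (cs.map (fun pc => pc.2.length)).foldr max 0
def pvT (cs : List (Int × List Int)) : Nat := (cs.map (fun pc => pc.2.length)).sum

lemma pv_sd_head (P : List Int) (m : Int) (t : List Int) (h : pvSortDesc P = m :: t) :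
    PySem.List.max? P (fun x => x) = some m := by
  have hPne : P ≠ [] := by
    intro hP; rw [hP] at h; simp [pvSortDesc, PySem.List.sorted] at h
  obtain ⟨m0, hm0⟩ : ∃ m0, PySem.List.max? P (fun x => x) = some m0 := by
    cases hx : PySem.List.max? P (fun x => x) with
    | none => exact absurd ((PySem.List.max?_eq_none_iff P _).mp hx) hPne
    | some m0 => exact ⟨m0, rfl⟩
  have hmem : m ∈ P := (PySem.List.mem_sorted P _ true m).mp (h ▸ List.mem_cons_self)
  have h1 : m0 ≤ m := PySem.List.key_head_sorted_rev_ge P (fun x => x) h m0 (PySem.List.max?_mem hm0)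
  have h2 : m ≤ m0 := PySem.List.max?_isMax hm0 m hmem
  rw [hm0, le_antisymm h2 h1]

lemma pv_sd_erase (P : List Int) (m : Int) (t : List Int) (h : pvSortDesc P = m :: t) :
    (PySem.List.index? P m).isSome ∧
    P.getD ((PySem.List.index? P m).getD 0) 0 = m ∧
    pvSortDesc (P.eraseIdx ((PySem.List.index? P m).getD 0)) = t ∧
    P.length = t.length + 1 := by
  have hmem : m ∈ P := (PySem.List.mem_sorted P _ true m).mp (h ▸ List.mem_cons_self)
  have hs : (PySem.List.index? P m).isSome := (PySem.List.index?_isSome_iff P m).mpr hmem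
  obtain ⟨k, hk⟩ : ∃ k, PySem.List.index? P m = some k := by
    cases hx : PySem.List.index? P m with
    | none => rw [hx] at hs; simp at hs
    | some k => exact ⟨k, rfl⟩
  have hh : PySem.List.sorted P (fun x => x) true = m :: t := h
  obtain ⟨pre, suf, hP, hlen, _⟩ := (PySem.List.index?_eq_some_iff P m k).mp hk
  obtain ⟨hklt, hPk, _⟩ := PySem.List.getElem_of_index?_eq_some hk
  rw [hk]
  have herase : P.eraseIdx k = pre ++ suf := by
    rw [hP, List.eraseIdx_append_of_length_le (by omega), ← hlen]
    simp
  have hperm : (m :: t).Perm P := h ▸ PySem.List.sorted_perm P (fun x => x) true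
  have hperm2 : (P.eraseIdx k).Perm t := by
    have h3 : P.Perm (m :: (pre ++ suf)) := by
      rw [hP]; exact List.perm_middle
    have := (hperm.trans h3).cons_inv
    exact herase ▸ this.symm
  have hpair : List.Pairwise (fun a b : Int => b ≤ a) t :=
    (hh ▸ PySem.List.sorted_pairwise_rev P (fun x => x)).of_cons
  have hpairX : List.Pairwise (fun a b : Int => b ≤ a) (pvSortDesc (P.eraseIdx k)) :=
    PySem.List.sorted_pairwise_rev _ _
  have hpermX : (pvSortDesc (P.eraseIdx k)).Perm t :=
    (PySem.List.sorted_perm _ _ _).trans hperm2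
  refine ⟨by simp, ?_, ?_, ?_⟩
  · simp [List.getD_eq_getElem?_getD, hklt, hPk]
  · exact List.eq_of_perm_of_sorted (fun a b _ _ h1 h2 => le_antisymm h2 h1) hpairX hpair hpermX
  · have := PySem.List.length_sorted P (fun x => x) true
    rw [hh] at this; simp at this; omega

lemma pv_forall2_keys (rem cs : List (Int × List Int)) (h : List.Forall₂ pvRelPair rem cs) :
    rem.map Prod.fst = cs.map Prod.fst := by
  induction h with
  | nil => rfl
  | cons h1 _ ih => simp [h1.1, ih]

lemma pv_filt_keys (cs : List (Int × List Int)) :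
    List.Sublist ((pvFilt cs).map Prod.fst) (cs.map Prod.fst) :=
  List.Sublist.map _ List.filter_sublist

lemma pv_round (cs : List (Int × List Int)) :
    ∀ (done rem : List (Int × List Int)) (cur : Int),
    List.Forall₂ pvRelPair rem (pvFilt cs) →
    (done.map Prod.fst ++ cs.map Prod.fst).Nodup →
    ∃ rem', (cs.map Prod.fst).foldl divseqKey (cur, PySem.Dict.mk (done ++ rem)) =
        (cur * pvRoundProd cs, PySem.Dict.mk (done ++ rem')) ∧
      List.Forall₂ pvRelPair rem' (pvFilt (pvTailC cs)) := by
  induction cs with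
  | nil =>
      intro done rem cur h1 _
      refine ⟨rem, ?_, ?_⟩
      · simp [pvRoundProd]
      · simpa [pvFilt, pvTailC] using h1
  | cons pc cs' ih =>
      intro done rem cur h1 h2
      obtain ⟨p, c⟩ := pc
      simp only [List.map_cons, List.map_append] at h2 ⊢
      have h2' := List.nodup_append.mp (by simpa using h2)
      have hpdone : p ∉ done.map Prod.fst := fun hd => h2'.2.2 p hd p (by simp) rfl
      have hpcs' : p ∉ cs'.map Prod.fst := (List.nodup_cons.mp h2'.2.1).1
      have hndrec : (done.map Prod.fst ++ cs'.map Prod.fst).Nodup :=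
        List.nodup_append.mpr ⟨h2'.1, (List.nodup_cons.mp h2'.2.1).2,
          fun a ha b hb => h2'.2.2 a ha b (List.mem_cons_of_mem _ hb)⟩
      by_cases hc : c = []
      · subst hc
        have hrk : rem.map Prod.fst = (pvFilt cs').map Prod.fst := by
          have := pv_forall2_keys _ _ h1
          simpa [pvFilt] using this
        have hprem : p ∉ rem.map Prod.fst := by
          rw [hrk]; exact fun hr => hpcs' ((pv_filt_keys cs').mem hr)
        have hstep : divseqKey (cur, PySem.Dict.mk (done ++ rem)) p = (cur, PySem.Dict.mk (done ++ rem)) := by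
          have hget : (PySem.Dict.mk (done ++ rem)).get? p = none := by
            rw [PySem.Dict.get?_eq_none_iff_not_mem_keys]
            simp only [PySem.Dict.keys, List.map_append]
            exact fun hmem => (List.mem_append.mp hmem).elim (fun h => hpdone h) (fun h => hprem h)
          simp [divseqKey, hget]
        have h1' : List.Forall₂ pvRelPair rem (pvFilt cs') := by simpa [pvFilt] using h1
        obtain ⟨rem', heq, hF⟩ := ih done rem cur h1' hndrec
        refine ⟨rem', ?_, ?_⟩
        · rw [List.foldl_cons, hstep, heq, Prod.mk.injEq]
          exact ⟨by simp only [pvRoundProd]; ring, rfl⟩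
        · simpa [pvFilt, pvTailC] using hF
      · obtain ⟨m, t, rfl⟩ : ∃ m t, c = m :: t := by
          cases c with
          | nil => exact absurd rfl hc
          | cons m t => exact ⟨m, t, rfl⟩
        have h1' : List.Forall₂ pvRelPair rem ((p, m :: t) :: pvFilt cs') := by simpa [pvFilt] using h1
        obtain ⟨V, rem2, rfl, hV, hF2⟩ :
            ∃ V rem2, rem = (p, V) :: rem2 ∧ pvSortDesc V = m :: t ∧ List.Forall₂ pvRelPair rem2 (pvFilt cs') := by
          cases h1' with
          | cons hrel hF2 =>
            rename_i hd tl
            obtain ⟨hx, hy⟩ := hd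
            have hxp : hx = p := hrel.1
            exact ⟨hy, tl, by rw [hxp], hrel.2, hF2⟩
        have hrem2k : rem2.map Prod.fst = (pvFilt cs').map Prod.fst := pv_forall2_keys _ _ hF2
        have hprem2 : p ∉ rem2.map Prod.fst := by
          rw [hrem2k]; exact fun hr => hpcs' ((pv_filt_keys cs').mem hr)
        have hget : (PySem.Dict.mk (done ++ (p, V) :: rem2)).get? p = some V := by
          simp only [PySem.Dict.get?, PySem.Dict.items, List.find?_append]
          have hfd : done.find? (fun q => q.1 == p) = none := by
            rw [List.find?_eq_none]
            intro q hq hbeq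
            exact hpdone (List.mem_map.mpr ⟨q, hq, by simpa using hbeq⟩)
          simp [hfd]
        have hdone_f : List.filter (fun q => !(q.1 == p)) done = done := by
          rw [List.filter_eq_self]
          intro q hq
          simpa using fun hqe => hpdone (List.mem_map.mpr ⟨q, hq, by simp [hqe]⟩)
        have hrem2_f : List.filter (fun q => !(q.1 == p)) ((p, V) :: rem2) = rem2 := by
          rw [List.filter_cons_of_neg (by simp), List.filter_eq_self]
          intro q hq
          simpa using fun hqe => hprem2 (List.mem_map.mpr ⟨q, hq, by simp [hqe]⟩)
        have hmax := pv_sd_head V m t hV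
        obtain ⟨-, hVk, hVe, hVlen⟩ := pv_sd_erase V m t hV
        by_cases ht : t = []
        · subst ht
          simp only [List.length_nil] at hVlen
          have hstep : divseqKey (cur, PySem.Dict.mk (done ++ (p, V) :: rem2)) p =
              (cur * p ^ m.toNat, PySem.Dict.mk (done ++ rem2)) := by
            simp only [divseqKey, hget, hmax, hVk]
            rw [if_neg (by omega)]
            simp only [Prod.mk.injEq]
            refine ⟨by trivial, ?_⟩
            simp only [PySem.Dict.erase, PySem.Dict.items, List.filter_append, PySem.Dict.mk.injEq]
            rw [hdone_f, hrem2_f]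
          obtain ⟨rem', heq, hF⟩ := ih done rem2 (cur * p ^ m.toNat) hF2 hndrec
          refine ⟨rem', ?_, ?_⟩
          · rw [List.foldl_cons, hstep, heq, Prod.mk.injEq]
            exact ⟨by simp only [pvRoundProd]; ring, rfl⟩
          · simp only [pvTailC, List.map_cons, pvFilt, List.filter_cons]
            simp only [List.tail_cons, List.isEmpty_nil, Bool.not_true, if_false]
            simpa [pvFilt, pvTailC] using hF
        · have hVlen1 : 1 < V.length := by
            have htl : t.length ≠ 0 := fun h0 => ht (List.length_eq_zero_iff.mp h0)
            omega
          set V' := V.eraseIdx ((PySem.List.index? V m).getD 0) with hV'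
          have hstep : divseqKey (cur, PySem.Dict.mk (done ++ (p, V) :: rem2)) p =
              (cur * p ^ m.toNat, PySem.Dict.mk ((done ++ [(p, V')]) ++ rem2)) := by
            simp only [divseqKey, hget, hmax, hVk]
            rw [if_pos hVlen1]
            simp only [Prod.mk.injEq]
            refine ⟨by trivial, ?_⟩
            have hcont : (PySem.Dict.mk (done ++ (p, V) :: rem2)).contains p = true := by
              rw [PySem.Dict.contains_eq_isSome_get?, hget]
              rfl
            simp only [PySem.Dict.insert, hcont, if_pos, PySem.Dict.items, List.map_append,
              List.map_cons, PySem.Dict.mk.injEq]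
            have hmd : List.map (fun q => if (q.1 == p) = true then (p, V') else q) done = done := by
              rw [List.map_congr_left (g := fun q => q) ?_, List.map_id']
              intro q hq
              rw [if_neg (by simpa using fun hqe => hpdone (List.mem_map.mpr ⟨q, hq, by simp [hqe]⟩))]
            have hmr : List.map (fun q => if (q.1 == p) = true then (p, V') else q) rem2 = rem2 := by
              rw [List.map_congr_left (g := fun q => q) ?_, List.map_id']
              intro q hq
              rw [if_neg (by simpa using fun hqe => hprem2 (List.mem_map.mpr ⟨q, hq, by simp [hqe]⟩))]
            rw [hmd, hmr]
            simp only [BEq.rfl, if_true, List.append_assoc, List.singleton_append, hV',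
              PySem.List.index?_eq_idxOf?]
          obtain ⟨rem', heq, hF⟩ := ih (done ++ [(p, V')]) rem2 (cur * p ^ m.toNat) hF2 (by
            refine List.nodup_append.mpr ⟨?_, (List.nodup_cons.mp h2'.2.1).2, ?_⟩
            · simp only [List.map_append, List.map_cons, List.map_nil]
              refine List.nodup_append.mpr ⟨h2'.1, by simp, ?_⟩
              intro a ha b hb
              simp only [List.mem_cons, List.not_mem_nil, or_false] at hb
              subst hb
              exact fun hab => hpdone (hab ▸ ha)
            · intro a ha b hb
              simp only [List.map_append, List.map_cons, List.map_nil, List.mem_append] at ha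
              rcases ha with ha | ha
              · exact h2'.2.2 a ha b (List.mem_cons_of_mem _ hb)
              · simp only [List.mem_cons, List.not_mem_nil, or_false] at ha
                subst ha
                exact fun hab => hpcs' (hab ▸ hb))
          refine ⟨(p, V') :: rem', ?_, ?_⟩
          · rw [List.foldl_cons, hstep, heq, Prod.mk.injEq]
            refine ⟨by simp only [pvRoundProd]; ring, ?_⟩
            simp [PySem.Dict.mk.injEq]
          · simp only [pvTailC, List.map_cons, pvFilt, List.filter_cons, List.tail_cons]
            have hne : (!t.isEmpty) = true := by
              cases t with
              | nil => exact absurd rfl ht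
              | cons a b => simp
            rw [if_pos hne]
            refine List.Forall₂.cons ⟨rfl, hVe⟩ ?_
            simpa [pvFilt, pvTailC] using hF

lemma pv_M_zero (cs : List (Int × List Int)) (h : pvFilt cs = []) : pvM cs = 0 := by
  induction cs with
  | nil => rfl
  | cons pc cs' ih =>
      simp only [pvFilt, List.filter_cons] at h
      by_cases hc : pc.2.isEmpty
      · rw [hc] at h
        simp only [Bool.not_true, if_neg] at h
        have h2 : pc.2 = [] := by simpa using hc
        simp only [pvM, List.map_cons, List.foldr_cons, h2, List.length_nil, Nat.zero_max]
        exact ih (by simpa [pvFilt] using h)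
      · rw [Bool.not_eq_true] at hc
        rw [hc] at h
        simp at h

lemma pv_M_cons (p : Int) (c : List Int) (cs : List (Int × List Int)) :
    pvM ((p, c) :: cs) = max c.length (pvM cs) := rfl

lemma pv_M_tail (cs : List (Int × List Int)) : pvM (pvTailC cs) = pvM cs - 1 := by
  induction cs with
  | nil => rfl
  | cons pc cs' ih =>
      obtain ⟨p, c⟩ := pc
      simp only [pvTailC, List.map_cons] at *
      rw [pv_M_cons, pv_M_cons, ih]
      have : c.tail.length = c.length - 1 := by simp
      omega

lemma pv_T_cons (p : Int) (c : List Int) (cs : List (Int × List Int)) :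
    pvT ((p, c) :: cs) = c.length + pvT cs := rfl

lemma pv_T_tailC_cons (p : Int) (c : List Int) (cs : List (Int × List Int)) :
    pvT (pvTailC ((p, c) :: cs)) = c.tail.length + pvT (pvTailC cs) := rfl

lemma pv_T_tail_le (cs : List (Int × List Int)) : pvT (pvTailC cs) ≤ pvT cs := by
  induction cs with
  | nil => exact Nat.le_refl _
  | cons pc cs' ih =>
      obtain ⟨p, c⟩ := pc
      rw [pv_T_cons, pv_T_tailC_cons]
      have : c.tail.length = c.length - 1 := by simp
      omega

lemma pv_T_tail (cs : List (Int × List Int)) (h : pvFilt cs ≠ []) : pvT (pvTailC cs) < pvT cs := by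
  induction cs with
  | nil => exact absurd rfl h
  | cons pc cs' ih =>
      obtain ⟨p, c⟩ := pc
      rw [pv_T_cons, pv_T_tailC_cons]
      by_cases hc : c = []
      · subst hc
        simp only [pvFilt, List.filter_cons, List.isEmpty_nil, Bool.not_true] at h
        have := ih (by simpa [pvFilt] using h)
        simpa using this
      · have h1 : c.tail.length = c.length - 1 := by simp
        have h2 : c.length ≠ 0 := by simpa using hc
        have h3 := pv_T_tail_le cs'
        omega

lemma pv_keys_tailC (cs : List (Int × List Int)) : (pvTailC cs).map Prod.fst = cs.map Prod.fst := by
  simp [pvTailC]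

lemma pv_dropC_zero (cs : List (Int × List Int)) : pvDropC 0 cs = cs := by
  simp [pvDropC]

lemma pv_dropC_tailC (i : Nat) (cs : List (Int × List Int)) :
    pvDropC i (pvTailC cs) = pvDropC (i + 1) cs := by
  simp only [pvDropC, pvTailC, List.map_map]
  apply List.map_congr_left
  intro pc _
  simp [List.drop_tail]

lemma pv_filt_of_M_zero (cs : List (Int × List Int)) (h0 : pvM cs = 0) : pvFilt cs = [] := by
  induction cs with
  | nil => rfl
  | cons pc cs' ih =>
      obtain ⟨p, c⟩ := pc
      rw [pv_M_cons] at h0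
      have hc : c = [] := List.length_eq_zero_iff.mp (by omega)
      subst hc
      simp only [pvFilt, List.filter_cons, List.isEmpty_nil, Bool.not_true, Bool.false_eq_true,
        if_false]
      exact ih (by omega)

lemma pv_M_ne_zero (cs : List (Int × List Int)) (h : pvFilt cs ≠ []) : pvM cs ≠ 0 :=
  fun h0 => h (pv_filt_of_M_zero cs h0)

lemma pv_loop : ∀ (fuel : Nat) (cs rem : List (Int × List Int)) (sq : List Int),
    List.Forall₂ pvRelPair rem (pvFilt cs) →
    (cs.map Prod.fst).Nodup →
    pvT cs < fuel →
    divseqLoop (cs.map Prod.fst) fuel (PySem.Dict.mk rem) sq =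
      sq ++ (List.range (pvM cs)).map (fun i => pvRoundProd (pvDropC i cs)) := by
  intro fuel
  induction fuel with
  | zero => intro cs rem sq _ _ hf; omega
  | succ f ih =>
      intro cs rem sq h1 hnd hf
      by_cases hrem : rem = []
      · subst hrem
        have hfilt : pvFilt cs = [] := List.forall₂_nil_left_iff.mp h1
        rw [divseqLoop]
        simp [PySem.Dict.size, pv_M_zero cs hfilt]
      · have hfilt : pvFilt cs ≠ [] := by
          intro h0; rw [h0] at h1; cases h1; exact hrem rfl
        obtain ⟨rem', heq, hF⟩ := pv_round cs [] rem 1 h1 (by simpa using hnd)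
        rw [divseqLoop]
        have hsz : ¬ (PySem.Dict.mk rem).size = 0 := by
          simpa [PySem.Dict.size] using hrem
        rw [if_neg hsz]
        simp only [List.nil_append] at heq
        simp only [heq]
        have hnd' : ((pvTailC cs).map Prod.fst).Nodup := by rw [pv_keys_tailC]; exact hnd
        have hfuel' : pvT (pvTailC cs) < f := by
          have := pv_T_tail cs hfilt
          omega
        have hrec := ih (pvTailC cs) rem' (sq ++ [1 * pvRoundProd cs]) hF hnd' hfuel'
        rw [pv_keys_tailC] at hrec
        rw [hrec]
        have hM : pvM cs = pvM (pvTailC cs) + 1 := by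
          have h0 : pvM cs ≠ 0 := pv_M_ne_zero cs hfilt
          rw [pv_M_tail]; omega
        rw [hM, List.range_succ_eq_map, List.map_cons, List.map_map]
        simp only [pv_dropC_zero, Function.comp]
        rw [List.append_assoc]
        congr 1
        simp only [List.singleton_append, one_mul]
        congr 1
        apply List.map_congr_left
        intro i _
        simp [pv_dropC_tailC, Function.comp, Nat.succ_eq_add_one]
lemma pv_alt_n (cs : List (Int × List Int)) : ∀ a : Nat,
    cs.foldl (fun a pc => if pc.2.length > a then pc.2.length else a) a = max a (pvM cs) := by
  induction cs with
  | nil => intro a; simp [pvM]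
  | cons pc cs' ih =>
      intro a
      obtain ⟨p, c⟩ := pc
      rw [List.foldl_cons, ih, pv_M_cons]
      have : (if c.length > a then c.length else a) = max a c.length := by
        split_ifs with h <;> omega
      rw [this]
      omega

lemma pv_drop_cons (c : List Int) (i : Nat) (h : i < c.length) :
    List.drop i c = c.getD i 0 :: List.drop (i+1) c := by
  have h1 := List.getElem_cons_drop (as := c) (i := i) h
  rw [List.getD_eq_getElem c 0 h]
  exact h1.symm

lemma pv_alt_col (i : Nat) (cs : List (Int × List Int)) : ∀ cur : Int,
    cs.foldl (fun cur pc => if i < pc.2.length then cur * pc.1 ^ (pc.2.getD i 0).toNat else cur) cur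
      = cur * pvRoundProd (pvDropC i cs) := by
  induction cs with
  | nil => intro cur; simp [pvDropC, pvRoundProd]
  | cons pc cs' ih =>
      intro cur
      obtain ⟨p, c⟩ := pc
      rw [List.foldl_cons]
      by_cases hi : i < c.length
      · rw [if_pos hi, ih]
        have hdrop := pv_drop_cons c i hi
        simp only [pvDropC, List.map_cons, pvRoundProd, hdrop]
        have : pvDropC i cs' = cs'.map (fun pc => (pc.1, pc.2.drop i)) := rfl
        rw [← this]
        ring
      · rw [if_neg hi, ih]
        have hdrop : c.drop i = [] := List.drop_eq_nil_of_le (by omega)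
        simp only [pvDropC, List.map_cons, pvRoundProd, hdrop]
        have : pvDropC i cs' = cs'.map (fun pc => (pc.1, pc.2.drop i)) := rfl
        rw [← this]
        ring

lemma pv_foldl_len (l : List (List Int)) : ∀ a : Nat,
    l.foldl (fun a P => a + P.length) a = a + (l.map List.length).sum := by
  induction l with
  | nil => intro a; simp
  | cons P l' ih => intro a; rw [List.foldl_cons, ih]; simp; omega

lemma pv_T_eq (items : List (Int × List Int)) :
    pvT (items.map (fun pr => (pr.1, pvSortDesc pr.2))) = ((items.map Prod.snd).map List.length).sum := by
  unfold pvT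
  rw [List.map_map, List.map_map]
  congr 1
  apply List.map_congr_left
  intro pr _
  simp [pvSortDesc, PySem.List.length_sorted]
lemma pv_main (fp : List (Int × List Int)) (hpre : Pre_divseq fp) : divseq fp = divseq_alt fp := by
  unfold divseq divseq_alt
  set d := PySem.Dict.ofList fp with hd
  set cs := d.items.map (fun pr => (pr.1, pvSortDesc pr.2)) with hcs
  have hfilt : pvFilt cs = cs := by
    rw [pvFilt, List.filter_eq_self]
    intro pc hpc
    obtain ⟨pr, hpr, rfl⟩ := List.mem_map.mp hpc
    have hne := (hpre pr hpr).1
    simpa [pvSortDesc, PySem.List.sorted_eq_nil_iff] using hne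
  have hF : List.Forall₂ pvRelPair d.items (pvFilt cs) := by
    rw [hfilt, hcs]
    rw [List.forall₂_map_right_iff]
    apply List.forall₂_same.mpr
    intro pr _
    exact ⟨rfl, rfl⟩
  have hkeys : cs.map Prod.fst = d.keys := by
    rw [hcs, List.map_map]; rfl
  have hnd : (cs.map Prod.fst).Nodup := by
    rw [hkeys]; exact PySem.Dict.nodup_keys_ofList fp
  have hfuel : pvT cs < d.values.foldl (fun a P => a + P.length) 0 + 1 := by
    rw [pv_foldl_len, hcs, pv_T_eq]
    have : d.values = d.items.map Prod.snd := rfl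
    rw [this]
    omega
  have hmk : PySem.Dict.mk d.items = d := rfl
  have hloop := pv_loop (d.values.foldl (fun a P => a + P.length) 0 + 1) cs d.items [] hF hnd hfuel
  rw [hmk, hkeys] at hloop
  rw [hloop]
  dsimp only
  rw [pv_alt_n, Nat.zero_max]
  simp only [List.nil_append]
  apply List.map_congr_left
  intro i _
  rw [pv_alt_col, one_mul]

-- ===== VERDICT (by name: the statement is the Claim_ definition above) =====
theorem divseq_spec : Claim_equal_divseq := by
  unfold Claim_equal_divseq Spec_divseq
  intro fp _ hpre
  exact pv_main fp hpre
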